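-- pv_equiv track=rewrite | github.com/kevengond/Particao_numeros_Apa | backtrackingAlgorithm.py | is_valid_partition
-- ===== SOURCE A (Python) =====
-- def is_valid_partition(partitions):
--     all_elements = set()
--     for subset in partitions:
--         for num in subset:
--             if num in all_elements:
--                 return False
--             all_elements.add(num)
--     return True
-- ===== SOURCE B (Python) =====
-- def is_valid_partition(partitions):
--     total = sum(len(subset) for subset in partitions)
--     unique = len({num for subset in partitions for num in subset})
--     return total == unique
-- ===== Notes on version B (the rewrite author's own statement) =====
-- stated objective: simpler
-- what changed: Replaces the incremental membership-check loop with early return by two aggregate passes: compare the total element count with the number of distinct elements.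
import Mathlib
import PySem

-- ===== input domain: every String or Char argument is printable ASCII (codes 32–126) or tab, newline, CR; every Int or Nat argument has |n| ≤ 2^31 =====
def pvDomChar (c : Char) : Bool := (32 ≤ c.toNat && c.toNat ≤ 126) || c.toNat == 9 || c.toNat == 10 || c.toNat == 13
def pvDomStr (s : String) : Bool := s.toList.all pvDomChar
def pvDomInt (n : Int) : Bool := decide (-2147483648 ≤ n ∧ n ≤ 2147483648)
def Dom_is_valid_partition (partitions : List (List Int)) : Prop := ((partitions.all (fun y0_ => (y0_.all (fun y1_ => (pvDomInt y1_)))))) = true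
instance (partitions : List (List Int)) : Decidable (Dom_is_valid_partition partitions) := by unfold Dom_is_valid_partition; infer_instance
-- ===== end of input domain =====

-- B replaces A's incremental membership-check loop (early return on the first repeat)
-- by two aggregate passes: total element count vs number of distinct elements (objective: simpler).

-- ===== PORT A =====
-- inner loop: 'for num in subset: if num in all_elements: return False; all_elements.add(num)'
def pvInnerA (s : PySem.Set Int) : List Int → Option (PySem.Set Int)
  | [] => some s
  | n :: rest => if PySem.Set.contains s n then none else pvInnerA (PySem.Set.add s n) rest

-- outer loop over partitions, propagating the early 'return False'
def pvOuterA (s : PySem.Set Int) : List (List Int) → Bool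
  | [] => true
  | sub :: rest =>
    match pvInnerA s sub with
    | none => false
    | some s' => pvOuterA s' rest

def is_valid_partition (partitions : List (List Int)) : Bool :=
  pvOuterA PySem.Set.empty partitions

-- ===== PORT B =====
def is_valid_partition_alt (partitions : List (List Int)) : Bool :=
  let total : Int := (partitions.map (fun subset => PySem.List.len subset)).sum
  let unique : Int := PySem.Set.len (PySem.Set.ofList (partitions.flatMap (fun subset => subset)))
  total == unique

-- ===== PRECONDITION & SPEC =====
def Spec_is_valid_partition (partitions : List (List Int)) (out : Bool) : Prop := out = is_valid_partition_alt partitions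
instance (partitions : List (List Int)) (out : Bool) : Decidable (Spec_is_valid_partition partitions out) := by unfold Spec_is_valid_partition; infer_instance

-- ===== CLAIM (what is proved, stated in full; the proofs are below) =====
def Claim_equal_is_valid_partition : Prop := ∀ (partitions : List (List Int)), Dom_is_valid_partition partitions → Spec_is_valid_partition partitions (is_valid_partition partitions)

-- ===== LEMMAS AND PROOFS =====

theorem pvInnerA_eq (xs : List Int) (s : PySem.Set Int) (hs : s.Nodup) :
    pvInnerA s xs = if (s ++ xs).Nodup then some (s ++ xs) else none := by
  induction xs generalizing s with
  | nil => simp [pvInnerA, hs]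
  | cons n rest ih =>
    by_cases hmem : n ∈ s
    · have hc : PySem.Set.contains s n = true := (PySem.Set.contains_iff s n).mpr hmem
      have hnd : ¬ (s ++ n :: rest).Nodup := by
        intro h
        exact (List.disjoint_of_nodup_append h) hmem List.mem_cons_self
      rw [pvInnerA, if_pos hc, if_neg hnd]
    · have hc : PySem.Set.contains s n = false := by
        simp only [Bool.eq_false_iff]
        intro h; exact hmem ((PySem.Set.contains_iff s n).mp h)
      have hadd : PySem.Set.add s n = s ++ [n] := PySem.Set.add_of_not_mem hmem
      have hn : (s ++ [n] : List Int).Nodup := by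
        simp [List.nodup_append, hs]
        exact fun a ha hEq => hmem (hEq ▸ ha)
      rw [pvInnerA, if_neg (by rw [hc]; exact Bool.false_ne_true), hadd, ih _ hn]
      simp [List.append_assoc]

theorem pvOuterA_eq (ps : List (List Int)) (s : PySem.Set Int) (hs : s.Nodup) :
    pvOuterA s ps = decide ((s ++ ps.flatten).Nodup) := by
  induction ps generalizing s with
  | nil => simp [pvOuterA, hs]
  | cons sub rest ih =>
    rw [pvOuterA, pvInnerA_eq sub s hs]
    by_cases h : (s ++ sub).Nodup
    · rw [if_pos h]
      rw [show (match some (s ++ sub) with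
            | none => false
            | some s' => pvOuterA s' rest) = pvOuterA (s ++ sub) rest from rfl,
          ih _ h]
      simp [List.append_assoc]
    · rw [if_neg h]
      have hnd : ¬ (s ++ (sub :: rest).flatten).Nodup := by
        intro hn
        have hsub : (s ++ sub).Sublist (s ++ (sub :: rest).flatten) := by
          rw [List.flatten_cons, ← List.append_assoc]
          exact List.sublist_append_left (s ++ sub) rest.flatten
        exact h (hsub.nodup hn)
      exact (decide_eq_false hnd).symm

theorem ofList_length_lt (xs : List Int) (h : ¬ xs.Nodup) :
    (PySem.Set.ofList xs).length < xs.length := by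
  induction xs with
  | nil => exact absurd List.nodup_nil h
  | cons x rest ih =>
    rw [PySem.Set.ofList_cons]
    by_cases hx : x ∈ rest
    · have hx' : x ∈ PySem.Set.ofList rest := (PySem.Set.mem_ofList rest x).mpr hx
      have h1 : ((PySem.Set.ofList rest).discard x).length < (PySem.Set.ofList rest).length := by
        simp only [PySem.Set.discard]
        exact List.length_filter_lt_length_iff_exists.mpr ⟨x, hx', by simp⟩
      have h2 := PySem.Set.length_ofList_le rest
      simp only [List.length_cons]
      omega
    · have hr : ¬ rest.Nodup := fun hn => h (List.nodup_cons.mpr ⟨hx, hn⟩)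
      have h1 : ((PySem.Set.ofList rest).discard x).length ≤ (PySem.Set.ofList rest).length := by
        simp only [PySem.Set.discard]; exact List.length_filter_le _ _
      have h2 := ih hr
      simp only [List.length_cons]
      omega

theorem nodup_iff_len (xs : List Int) :
    xs.Nodup ↔ (PySem.Set.ofList xs).length = xs.length := by
  constructor
  · intro h; rw [PySem.Set.ofList_eq_self_of_nodup xs h]
  · intro h
    by_contra hn
    exact absurd h (Nat.ne_of_lt (ofList_length_lt xs hn))

theorem alt_eq (ps : List (List Int)) :
    is_valid_partition_alt ps = decide (ps.flatten.Nodup) := by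
  have hflat : ps.flatMap (fun subset => subset) = ps.flatten := by
    simp [List.flatMap_def]
  have hsum : ((ps.map (fun subset => PySem.List.len subset)).sum)
      = (ps.flatten.length : Int) := by
    simp only [PySem.List.len_eq, List.length_flatten]
    induction ps with
    | nil => simp
    | cons a l ih => simp [ih]
  simp only [is_valid_partition_alt, hflat, hsum, PySem.Set.len]
  by_cases h : ps.flatten.Nodup
  · rw [(nodup_iff_len _).mp h]
    simp [h]
  · have hne : (PySem.Set.ofList ps.flatten).length ≠ ps.flatten.length :=
      fun he => h ((nodup_iff_len _).mpr he)
    simp only [h, decide_false, beq_eq_false_iff_ne, ne_eq, Int.natCast_inj]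
    omega

-- ===== VERDICT (by name: the statement is the Claim_ definition above) =====
theorem is_valid_partition_spec : Claim_equal_is_valid_partition := by
  intro ps _
  unfold Spec_is_valid_partition
  rw [alt_eq, is_valid_partition, pvOuterA_eq ps PySem.Set.empty List.nodup_nil]
  simp [PySem.Set.empty]
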